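-- pv_equiv track=rewrite | github.com/alehkiz/Vega | app/utils/kernel.py | get_list_max_len
-- ===== SOURCE A (Python) =====
-- def get_list_max_len(l, max_value):
--     """
--     Recebe uma lista ´l´ a retorna a mesma lista, desde que a quantidade de caracteres da lista não exceda ´max_value´
--     """
--     if not isinstance(max_value, int) or max_value < 1:
--         return l
--     if sum([len(_) for _ in l]) < max_value:
--         return l
--     _temp_l = []
--     _temp_sum = 0
--     for v in l:
--         _temp_sum += len(v)
--         if _temp_sum > max_value:
--             break
--         _temp_l.append(v)
--     if not _temp_l:
--         return [l[0][0:max_value]]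
--     return _temp_l
-- ===== SOURCE B (Python) =====
-- def get_list_max_len(l, max_value):
--     if not isinstance(max_value, int) or max_value < 1:
--         return l
--     # build the full prefix-sum table of cumulative character lengths
--     prefix = []
--     total = 0
--     for v in l:
--         total += len(v)
--         prefix.append(total)
--     if total < max_value:
--         return l
--     # cutoff = how many prefix sums stay <= max_value (table is nondecreasing)
--     cutoff = sum(1 for p in prefix if p <= max_value)
--     if cutoff == 0:
--         return [l[0][0:max_value]]
--     return l[:cutoff]
-- ===== Notes on version B (the rewrite author's own statement) =====
-- stated objective: alternative
-- what changed: Replaces the incremental append-and-break loop by a build-prefix-sum-table, count-entries-<=max, then slice decomposition.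
import Mathlib
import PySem

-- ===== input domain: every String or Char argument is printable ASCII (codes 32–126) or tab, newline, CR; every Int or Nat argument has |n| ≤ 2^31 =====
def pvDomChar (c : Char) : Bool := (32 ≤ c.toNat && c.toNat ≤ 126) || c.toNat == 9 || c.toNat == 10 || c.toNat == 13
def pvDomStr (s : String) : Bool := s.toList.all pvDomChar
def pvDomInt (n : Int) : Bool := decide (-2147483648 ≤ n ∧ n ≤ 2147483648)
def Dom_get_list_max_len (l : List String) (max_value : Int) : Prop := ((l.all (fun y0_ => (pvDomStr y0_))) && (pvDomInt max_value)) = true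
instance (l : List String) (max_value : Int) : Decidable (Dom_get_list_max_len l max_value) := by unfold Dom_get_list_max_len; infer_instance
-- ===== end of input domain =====

-- B replaces A's incremental append-and-break loop by a build-full-prefix-sum-table,
-- count-entries-≤-max, then slice decomposition (objective: alternative, same cost).


-- ===== PORT A =====
-- the for-loop with break: accumulates kept elements; stops as soon as the running sum exceeds max_value
def pvALoop (l : List String) (max_value : Int) (acc : Int) : List String :=
  match l with
  | [] => []
  | v :: rest =>
    let s := acc + PySem.Str.len v
    if s > max_value then [] else v :: pvALoop rest max_value s

def get_list_max_len (l : List String) (max_value : Int) : List String :=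
  if max_value < 1 then l
  else if (l.map (fun v => PySem.Str.len v)).sum < max_value then l
  else
    let t := pvALoop l max_value 0
    -- l[0] is only reached with l nonempty (else the early sum test returned l), so headD "" is exact there
    if t = [] then [PySem.Str.slice (l.headD "") (some 0) (some max_value)] else t

-- ===== PORT B =====
def get_list_max_len_alt (l : List String) (max_value : Int) : List String :=
  if max_value < 1 then l
  else
    -- build the full prefix-sum table of cumulative character lengths (prefix, total)
    let pr := l.foldl (fun (st : List Int × Int) v =>
        let t := st.2 + PySem.Str.len v
        (st.1 ++ [t], t)) ([], 0)
    if pr.2 < max_value then l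
    else
      let cutoff := pr.1.countP (fun p => decide (p ≤ max_value))
      if cutoff = 0 then [PySem.Str.slice (l.headD "") (some 0) (some max_value)]
      else l.take cutoff

-- ===== PRECONDITION & SPEC =====
def Spec_get_list_max_len (l : List String) (max_value : Int) (out : List String) : Prop := out = get_list_max_len_alt l max_value
instance (l : List String) (max_value : Int) (out : List String) : Decidable (Spec_get_list_max_len l max_value out) := by unfold Spec_get_list_max_len; infer_instance

-- ===== CLAIM (what is proved, stated in full; the proofs are below) =====
def Claim_equal_get_list_max_len : Prop := ∀ (l : List String) (max_value : Int), Dom_get_list_max_len l max_value → Spec_get_list_max_len l max_value (get_list_max_len l max_value)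

-- ===== LEMMAS AND PROOFS =====

-- the prefix-sum table starting from a running sum s
def pvPrefixes (s : Int) : List String → List Int
  | [] => []
  | v :: rest => (s + PySem.Str.len v) :: pvPrefixes (s + PySem.Str.len v) rest

-- B's foldl builds exactly (acc ++ pvPrefixes s l, s + total length)
theorem pvFoldB (l : List String) (acc : List Int) (s : Int) :
    l.foldl (fun (st : List Int × Int) v =>
        let t := st.2 + PySem.Str.len v
        (st.1 ++ [t], t)) (acc, s)
      = (acc ++ pvPrefixes s l, s + (l.map (fun v => PySem.Str.len v)).sum) := by
  induction l generalizing acc s with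
  | nil => simp [pvPrefixes]
  | cons v rest ih =>
    simp only [List.foldl_cons, List.map_cons, List.sum_cons, pvPrefixes, ih]
    rw [List.append_assoc]
    simp [add_assoc]

theorem pvPrefixes_count_zero (l : List String) (m s : Int) (h : m < s) :
    (pvPrefixes s l).countP (fun p => decide (p ≤ m)) = 0 := by
  induction l generalizing s with
  | nil => simp [pvPrefixes]
  | cons v rest ih =>
    have hlen : PySem.Str.len v = (v.length : Int) := by simp [PySem.Str.len]
    have hv : (0:Int) ≤ (v.length : Int) := Int.natCast_nonneg _
    simp only [pvPrefixes, List.countP_cons, decide_eq_true_eq, hlen]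
    rw [ih _ (by omega), if_neg (show ¬ (s + (v.length : Int) ≤ m) by omega)]

-- A's break-loop is exactly "take the count of prefix sums ≤ max_value"
theorem pvALoop_eq_take (l : List String) (m s : Int) :
    pvALoop l m s = l.take ((pvPrefixes s l).countP (fun p => decide (p ≤ m))) := by
  induction l generalizing s with
  | nil => simp [pvALoop, pvPrefixes]
  | cons v rest ih =>
    have hlen : PySem.Str.len v = (v.length : Int) := by simp [PySem.Str.len]
    have hv : (0:Int) ≤ (v.length : Int) := Int.natCast_nonneg _
    simp only [pvPrefixes, List.countP_cons, decide_eq_true_eq, pvALoop, hlen]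
    by_cases hgt : s + (v.length : Int) > m
    · rw [if_pos hgt, pvPrefixes_count_zero rest m _ (by omega),
        if_neg (show ¬ (s + (v.length : Int) ≤ m) by omega)]
      rfl
    · rw [if_neg hgt, if_pos (show s + (v.length : Int) ≤ m by omega), ih]
      rfl

-- ===== VERDICT (by name: the statement is the Claim_ definition above) =====
theorem get_list_max_len_spec : Claim_equal_get_list_max_len := by
  intro l m _
  unfold Spec_get_list_max_len get_list_max_len get_list_max_len_alt
  simp only [pvFoldB, List.nil_append, pvALoop_eq_take, zero_add]
  split_ifs with h1 h2 h3 h4 h4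
  · rfl
  · rfl
  · rfl
  · -- A's kept list is empty, B's cutoff is nonzero: impossible
    exfalso
    rcases List.take_eq_nil_iff.mp h3 with h | h
    · exact h4 h
    · subst h; simp at h2; omega
  · -- A's kept list nonempty but cutoff = 0
    exfalso
    rw [h4] at h3
    simp at h3
  · rfl
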